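-- pv_equiv track=rewrite | github.com/Awesome8Indigo/Chopsticks | Chopsticks/chopsticks.py | find_split_moves
-- ===== SOURCE A (Python) =====
-- def is_5(x, y):
--     if x >= 5:
--         x = 0
--     if y >= 5:
--         y = 0
--     return [x, y]
--
-- def normalize_hand(hand):
--     return tuple(sorted(hand))
--
-- def is_valid_swap(hand, original):
--     if hand[0] + hand[1] != original[0] + original[1]:
--         return False
--     return True
--
-- def find_symmetric(groups):
--     seen = set()
--     clean = []
--     for h in groups:
--         nh = normalize_hand(h)
--         if nh not in seen:
--             seen.add(nh)
--             clean.append(h)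
--     return clean
--
-- def find_split_moves(hand):
--     out = [
--     is_5(hand[0] + hand[1] - b, b)
--     for b in range(hand[0] + hand[1] + 1)
--     if (
--         is_valid_swap(is_5(hand[0] + hand[1] - b, b), hand) and
--         normalize_hand(is_5(hand[0] + hand[1] - b, b)) != normalize_hand(hand)
--     )
--     ]
--     clean = find_symmetric(out)
--     return clean
-- ===== SOURCE B (Python) =====
-- def find_split_moves(hand):
--     total = hand[0] + hand[1]
--     lo = max(0, total - 4)
--     hi = min(total // 2, 4)
--     res = []
--     for b in range(lo, hi + 1):
--         a = total - b
--         if sorted([a, b]) != sorted(hand):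
--             res.append([a, b])
--     return res
-- ===== Notes on version B (the rewrite author's own statement) =====
-- stated objective: faster
-- what changed: Replaces the full 0..total range scan with capping helper, swap-validity check and a second dedup pass by a single direct loop over the closed-form valid window b in [max(0,total-4), min(total//2,4)] that emits each [total-b,b] pair at most once, so the dedup set and all helpers disappear.
import Mathlib
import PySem

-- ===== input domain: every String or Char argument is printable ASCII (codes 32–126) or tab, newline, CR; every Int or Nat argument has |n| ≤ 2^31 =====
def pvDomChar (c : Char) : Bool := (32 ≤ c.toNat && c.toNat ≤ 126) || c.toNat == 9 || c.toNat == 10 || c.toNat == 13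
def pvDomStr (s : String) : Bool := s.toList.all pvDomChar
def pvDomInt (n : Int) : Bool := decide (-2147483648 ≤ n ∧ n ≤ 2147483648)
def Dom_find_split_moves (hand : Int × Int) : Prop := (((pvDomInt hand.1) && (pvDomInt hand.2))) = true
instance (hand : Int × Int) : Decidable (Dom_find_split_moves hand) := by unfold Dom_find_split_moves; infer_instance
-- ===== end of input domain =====

-- B replaces A's full-range scan + dedup pass by one O(1) loop over the closed-form valid window (objective: faster).

-- ===== PORT A =====
def is_5 (x y : Int) : List Int :=
  let x := if x ≥ 5 then 0 else x
  let y := if y ≥ 5 then 0 else y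
  [x, y]

-- Python's normalize_hand returns a tuple; it is only ever compared for equality
-- and stored in a set, so the List representation is exact here.
def normalize_hand (hand : List Int) : List Int :=
  PySem.List.sorted hand (fun v => v) false

def is_valid_swap (hand : List Int) (original : Int × Int) : Bool :=
  if PySem.List.pyGetD hand 0 0 + PySem.List.pyGetD hand 1 0 ≠ original.1 + original.2 then false
  else true

def find_symmetric (groups : List (List Int)) : List (List Int) :=
  let r := groups.foldl (fun st h =>
    let nh := normalize_hand h
    if PySem.Set.contains st.1 nh then st
    else (PySem.Set.add st.1 nh, st.2 ++ [h]))
    ((PySem.Set.empty : PySem.Set (List Int)), ([] : List (List Int)))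
  r.2

def find_split_moves (hand : Int × Int) : List (List Int) :=
  let out := ((PySem.List.pyRange 0 (hand.1 + hand.2 + 1) 1).filter (fun b =>
      is_valid_swap (is_5 (hand.1 + hand.2 - b) b) hand &&
      decide (normalize_hand (is_5 (hand.1 + hand.2 - b) b) ≠ normalize_hand [hand.1, hand.2]))).map
    (fun b => is_5 (hand.1 + hand.2 - b) b)
  find_symmetric out

-- ===== PORT B =====
def find_split_moves_alt (hand : Int × Int) : List (List Int) :=
  let total := hand.1 + hand.2
  let lo := max 0 (total - 4)
  let hi := min (PySem.Int.floordiv total 2) 4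
  (PySem.List.pyRange lo (hi + 1) 1).foldl (fun res b =>
    let a := total - b
    if PySem.List.sorted [a, b] (fun v => v) false ≠ PySem.List.sorted [hand.1, hand.2] (fun v => v) false
    then res ++ [[a, b]] else res) []

-- ===== PRECONDITION & SPEC =====
def Spec_find_split_moves (hand : Int × Int) (out : List (List Int)) : Prop := out = find_split_moves_alt hand
instance (hand : Int × Int) (out : List (List Int)) : Decidable (Spec_find_split_moves hand out) := by unfold Spec_find_split_moves; infer_instance

-- ===== CLAIM (what is proved, stated in full; the proofs are below) =====
def Claim_equal_find_split_moves : Prop := ∀ (hand : Int × Int), Dom_find_split_moves hand → Spec_find_split_moves hand (find_split_moves hand)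

-- ===== LEMMAS AND PROOFS =====
-- Both programs depend on the hand only through t = hand[0]+hand[1] and
-- n = sorted(hand); coreA/coreB name those common forms (the bridges hA/hB are rfl),
-- and core_eq proves them equal by cases on t: empty for t < 0 and t ≥ 10,
-- and ten finite cases 0 ≤ t ≤ 9 with n kept symbolic.
def coreA (t : Int) (n : List Int) : List (List Int) :=
  find_symmetric (((PySem.List.pyRange 0 (t + 1) 1).filter (fun b =>
      (if PySem.List.pyGetD (is_5 (t - b) b) 0 0 + PySem.List.pyGetD (is_5 (t - b) b) 1 0 ≠ t then false else true) &&
      decide (PySem.List.sorted (is_5 (t - b) b) (fun v => v) false ≠ n))).map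
    (fun b => is_5 (t - b) b))

def coreB (t : Int) (n : List Int) : List (List Int) :=
  (PySem.List.pyRange (max 0 (t - 4)) (min (PySem.Int.floordiv t 2) 4 + 1) 1).foldl (fun res b =>
    if PySem.List.sorted [t - b, b] (fun v => v) false ≠ n
    then res ++ [[t - b, b]] else res) []

theorem hA (x y : Int) : find_split_moves (x, y) = coreA (x + y) (PySem.List.sorted [x, y] (fun v => v) false) := rfl
theorem hB (x y : Int) : find_split_moves_alt (x, y) = coreB (x + y) (PySem.List.sorted [x, y] (fun v => v) false) := rfl
theorem fdiv_lt (t q : Int) (h : t < q * 2) : PySem.Int.floordiv t 2 < q := by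
  rw [PySem.Int.floordiv_lt_iff_lt_mul] <;> omega

theorem fdiv_ge (t q : Int) (h : q * 2 ≤ t) : q ≤ PySem.Int.floordiv t 2 := by
  rw [PySem.Int.le_floordiv_iff_mul_le] <;> omega

theorem case_t0 (n : List Int) : coreA 0 n = coreB 0 n := by
  have hr : PySem.List.pyRange 0 (0 + 1) 1 = [0] := by decide
  have hr2 : PySem.List.pyRange (max 0 ((0:Int) - 4)) (min (PySem.Int.floordiv 0 2) 4 + 1) 1 = [0] := by decide
  simp only [coreA, coreB, hr, hr2]
  norm_num [is_5, find_symmetric, normalize_hand, PySem.List.sorted, PySem.List.insertBy,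
    PySem.List.pyGetD, List.filter]
  try (split_ifs <;> simp_all [PySem.List.insertBy])

theorem case_t1 (n : List Int) : coreA 1 n = coreB 1 n := by
  have hr : PySem.List.pyRange 0 (1 + 1) 1 = [0,1] := by decide
  have hr2 : PySem.List.pyRange (max 0 ((1:Int) - 4)) (min (PySem.Int.floordiv 1 2) 4 + 1) 1 = [0] := by decide
  simp only [coreA, coreB, hr, hr2]
  norm_num [is_5, find_symmetric, normalize_hand, PySem.List.sorted, PySem.List.insertBy,
    PySem.List.pyGetD, List.filter]
  try (split_ifs <;> simp_all [PySem.List.insertBy])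

theorem case_t2 (n : List Int) : coreA 2 n = coreB 2 n := by
  have hr : PySem.List.pyRange 0 (2 + 1) 1 = [0,1,2] := by decide
  have hr2 : PySem.List.pyRange (max 0 ((2:Int) - 4)) (min (PySem.Int.floordiv 2 2) 4 + 1) 1 = [0,1] := by decide
  simp only [coreA, coreB, hr, hr2]
  norm_num [is_5, find_symmetric, normalize_hand, PySem.List.sorted, PySem.List.insertBy,
    PySem.List.pyGetD, List.filter]
  try (split_ifs <;> simp_all [PySem.List.insertBy])

theorem case_t3 (n : List Int) : coreA 3 n = coreB 3 n := by
  have hr : PySem.List.pyRange 0 (3 + 1) 1 = [0,1,2,3] := by decide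
  have hr2 : PySem.List.pyRange (max 0 ((3:Int) - 4)) (min (PySem.Int.floordiv 3 2) 4 + 1) 1 = [0,1] := by decide
  simp only [coreA, coreB, hr, hr2]
  norm_num [is_5, find_symmetric, normalize_hand, PySem.List.sorted, PySem.List.insertBy,
    PySem.List.pyGetD, List.filter]
  try (split_ifs <;> simp_all [PySem.List.insertBy])

theorem case_t4 (n : List Int) : coreA 4 n = coreB 4 n := by
  have hr : PySem.List.pyRange 0 (4 + 1) 1 = [0,1,2,3,4] := by decide
  have hr2 : PySem.List.pyRange (max 0 ((4:Int) - 4)) (min (PySem.Int.floordiv 4 2) 4 + 1) 1 = [0,1,2] := by decide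
  simp only [coreA, coreB, hr, hr2]
  norm_num [is_5, find_symmetric, normalize_hand, PySem.List.sorted, PySem.List.insertBy,
    PySem.List.pyGetD, List.filter]
  try (split_ifs <;> simp_all [PySem.List.insertBy])

theorem case_t5 (n : List Int) : coreA 5 n = coreB 5 n := by
  have hr : PySem.List.pyRange 0 (5 + 1) 1 = [0,1,2,3,4,5] := by decide
  have hr2 : PySem.List.pyRange (max 0 ((5:Int) - 4)) (min (PySem.Int.floordiv 5 2) 4 + 1) 1 = [1,2] := by decide
  simp only [coreA, coreB, hr, hr2]
  norm_num [is_5, find_symmetric, normalize_hand, PySem.List.sorted, PySem.List.insertBy,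
    PySem.List.pyGetD, List.filter]
  try (split_ifs <;> simp_all [PySem.List.insertBy])

theorem case_t6 (n : List Int) : coreA 6 n = coreB 6 n := by
  have hr : PySem.List.pyRange 0 (6 + 1) 1 = [0,1,2,3,4,5,6] := by decide
  have hr2 : PySem.List.pyRange (max 0 ((6:Int) - 4)) (min (PySem.Int.floordiv 6 2) 4 + 1) 1 = [2,3] := by decide
  simp only [coreA, coreB, hr, hr2]
  norm_num [is_5, find_symmetric, normalize_hand, PySem.List.sorted, PySem.List.insertBy,
    PySem.List.pyGetD, List.filter]
  try (split_ifs <;> simp_all [PySem.List.insertBy])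

theorem case_t7 (n : List Int) : coreA 7 n = coreB 7 n := by
  have hr : PySem.List.pyRange 0 (7 + 1) 1 = [0,1,2,3,4,5,6,7] := by decide
  have hr2 : PySem.List.pyRange (max 0 ((7:Int) - 4)) (min (PySem.Int.floordiv 7 2) 4 + 1) 1 = [3] := by decide
  simp only [coreA, coreB, hr, hr2]
  norm_num [is_5, find_symmetric, normalize_hand, PySem.List.sorted, PySem.List.insertBy,
    PySem.List.pyGetD, List.filter]
  try (split_ifs <;> simp_all [PySem.List.insertBy])

theorem case_t8 (n : List Int) : coreA 8 n = coreB 8 n := by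
  have hr : PySem.List.pyRange 0 (8 + 1) 1 = [0,1,2,3,4,5,6,7,8] := by decide
  have hr2 : PySem.List.pyRange (max 0 ((8:Int) - 4)) (min (PySem.Int.floordiv 8 2) 4 + 1) 1 = [4] := by decide
  simp only [coreA, coreB, hr, hr2]
  norm_num [is_5, find_symmetric, normalize_hand, PySem.List.sorted, PySem.List.insertBy,
    PySem.List.pyGetD, List.filter]
  try (split_ifs <;> simp_all [PySem.List.insertBy])

theorem case_t9 (n : List Int) : coreA 9 n = coreB 9 n := by
  have hr : PySem.List.pyRange 0 (9 + 1) 1 = [0,1,2,3,4,5,6,7,8,9] := by decide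
  have hr2 : PySem.List.pyRange (max 0 ((9:Int) - 4)) (min (PySem.Int.floordiv 9 2) 4 + 1) 1 = [] := by decide
  simp only [coreA, coreB, hr, hr2]
  norm_num [is_5, find_symmetric, normalize_hand, PySem.List.sorted, PySem.List.insertBy,
    PySem.List.pyGetD, List.filter]

theorem core_eq (t : Int) (n : List Int) : coreA t n = coreB t n := by
  rcases lt_or_ge t 0 with hneg | hpos
  · have h1 : PySem.List.pyRange 0 (t + 1) 1 = [] := PySem.List.pyRange_one_eq_nil (by omega)
    have h2 : PySem.List.pyRange (max 0 (t - 4)) (min (PySem.Int.floordiv t 2) 4 + 1) 1 = [] := by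
      apply PySem.List.pyRange_one_eq_nil
      have := fdiv_lt t 0 (by omega)
      omega
    simp only [coreA, coreB]
    rw [h1, h2]
    simp [find_symmetric]
  rcases le_or_gt t 9 with hsmall | hbig
  · interval_cases t
    · exact case_t0 n
    · exact case_t1 n
    · exact case_t2 n
    · exact case_t3 n
    · exact case_t4 n
    · exact case_t5 n
    · exact case_t6 n
    · exact case_t7 n
    · exact case_t8 n
    · exact case_t9 n
  · -- t ≥ 10: every candidate fails the swap-validity test; both sides are empty
    have h2 : PySem.List.pyRange (max 0 (t - 4)) (min (PySem.Int.floordiv t 2) 4 + 1) 1 = [] := by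
      apply PySem.List.pyRange_one_eq_nil
      have := fdiv_ge t 5 (by omega)
      omega
    have h1 : (PySem.List.pyRange 0 (t + 1) 1).filter (fun b =>
        (if PySem.List.pyGetD (is_5 (t - b) b) 0 0 + PySem.List.pyGetD (is_5 (t - b) b) 1 0 ≠ t then false else true) &&
        decide (PySem.List.sorted (is_5 (t - b) b) (fun v => v) false ≠ n)) = [] := by
      rw [List.filter_eq_nil_iff]
      intro b hb
      have hmem := (PySem.List.mem_pyRange_one).1 hb
      simp only [is_5, PySem.List.pyGetD]
      norm_num [PySem.List.pyGet?, PySem.List.pyIdx?]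
      intro h
      split_ifs at h <;> omega
    simp only [coreA, coreB]
    rw [h1, h2]
    simp [find_symmetric]

theorem main_eq (x y : Int) : find_split_moves (x, y) = find_split_moves_alt (x, y) := by
  rw [hA, hB, core_eq]

-- ===== VERDICT (by name: the statement is the Claim_ definition above) =====
theorem find_split_moves_spec : Claim_equal_find_split_moves := by
  intro hand _
  obtain ⟨x, y⟩ := hand
  exact main_eq x y
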